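-- pv_equiv track=rewrite | github.com/deepzzzzzzzzz/ProgrammingSet1 | 8.py | knightlOnAChessboard
-- ===== SOURCE A (Python) =====
-- def knightlOnAChessboard(n):
--     count = []
--     for a in range(1, n):
--         temp = []
--         for b in range(1, n):
--             P = {(0, 0)}
--             flag = 0
--             f = True
--             V = set()
--             while f:
--                 flag += 1
--                 Q = set()
--
--                 V = V | P
--                 for p in P:
--                     if (p[0] == n - 1) and (p[1] == n - 1):
--                         f = False
--                         break
--                     if (0 <= p[0] + a < n) and (0 <= p[1] + b < n):
--                         Q.add((p[0] + a, p[1] + b))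
--                     if (0 <= p[0] - a < n) and (0 <= p[1] - b < n):
--                         Q.add((p[0] - a, p[1] - b))
--                     if (0 <= p[0] - a < n) and (0 <= p[1] + b < n):
--                         Q.add((p[0] - a, p[1] + b))
--                     if (0 <= p[0] + a < n) and (0 <= p[1] - b < n):
--                         Q.add((p[0] + a, p[1] - b))
--
--                     if (0 <= p[0] + b < n) and (0 <= p[1] + a < n):
--                         Q.add((p[0] + b, p[1] + a))
--                     if (0 <= p[0] - b < n) and (0 <= p[1] - a < n):
--                         Q.add((p[0] - b, p[1] - a))
--                     if (0 <= p[0] - b < n) and (0 <= p[1] + a < n):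
--                         Q.add((p[0] - b, p[1] + a))
--                     if (0 <= p[0] + b < n) and (0 <= p[1] - a < n):
--                         Q.add((p[0] + b, p[1] - a))
--
--                 P = set()
--                 P = P | Q
--                 P = P - V
--                 if len(P) == 0:
--                     break
--             if not f:
--                 temp.append(flag - 1)
--             else:
--                 temp.append(-1)
--         count.append(temp)
--     return count
-- ===== SOURCE B (Python) =====
-- def _solve(n, a, b):
--     # Bit-parallel reachability: the whole board is ONE integer (row x, col y at
--     # bit x*W + y, W = 2*n so that column over/underflow lands in the padding or
--     # a masked-off column).  Each round applies all 8 leap offsets to the entire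
--     # reached region at once as big-integer shifts and ORs (Kleene fixpoint
--     # iteration of the one-step move operator); no frontier/visited sets and no
--     # per-cell work.
--     W = 2 * n
--     shifts = [dx * W + dy for dx, dy in
--               [(a, b), (a, -b), (-a, b), (-a, -b), (b, a), (b, -a), (-b, a), (-b, -a)]]
--     mask = 0
--     for x in range(n):
--         mask |= ((1 << n) - 1) << (x * W)
--     R = 1
--     tbit = (n - 1) * W + (n - 1)
--     flag = 0
--     while True:
--         if (R >> tbit) & 1:
--             return flag
--         N = R
--         for s in shifts:
--             N |= (R << s) if s >= 0 else (R >> -s)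
--         N &= mask
--         if N == R:
--             return -1
--         R = N
--         flag += 1
--
--
-- def knightlOnAChessboard(n):
--     return [[_solve(n, a, b) for b in range(1, n)] for a in range(1, n)]
-- ===== Notes on version B (the rewrite author's own statement) =====
-- stated objective: alternative
-- what changed: Replaces A's frontier-set BFS (per-cell neighbour generation into frontier/visited Python sets each round) by bit-parallel reachability: the whole board is one big integer, each round ORs one shifted copy of the entire reached region per leap offset (Kleene fixpoint iteration of the one-step move operator) with a padding/mask scheme for the borders, reading off the round at which the corner bit appears.
import Mathlib
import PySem

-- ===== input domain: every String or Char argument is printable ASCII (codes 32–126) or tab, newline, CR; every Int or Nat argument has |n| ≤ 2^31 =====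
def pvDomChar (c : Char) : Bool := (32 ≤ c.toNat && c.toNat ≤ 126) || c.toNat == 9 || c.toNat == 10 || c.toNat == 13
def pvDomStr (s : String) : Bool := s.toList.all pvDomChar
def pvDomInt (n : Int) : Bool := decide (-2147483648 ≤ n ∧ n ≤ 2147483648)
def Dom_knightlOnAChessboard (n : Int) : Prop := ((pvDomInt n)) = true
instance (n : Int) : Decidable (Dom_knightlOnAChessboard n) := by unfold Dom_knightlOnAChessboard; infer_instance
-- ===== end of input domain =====

-- B replaces A's frontier-set BFS by bit-parallel reachability: the whole board is one
-- integer, each round ORed with shifted copies of the entire reached region (alternative).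

-- ===== PORT A =====
-- A's eight in-bounds guarded `Q.add` statements, one call per statement (same conditions, same order).
def pvAddIf (n : Int) (Q : PySem.Set (Int × Int)) (c : Int × Int) : PySem.Set (Int × Int) :=
  if (0 ≤ c.1 ∧ c.1 < n) ∧ (0 ≤ c.2 ∧ c.2 < n) then PySem.Set.add Q c else Q

def pvNbrAdds (n a b : Int) (Q : PySem.Set (Int × Int)) (p : Int × Int) : PySem.Set (Int × Int) :=
  let Q := pvAddIf n Q (p.1 + a, p.2 + b)
  let Q := pvAddIf n Q (p.1 - a, p.2 - b)
  let Q := pvAddIf n Q (p.1 - a, p.2 + b)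
  let Q := pvAddIf n Q (p.1 + a, p.2 - b)
  let Q := pvAddIf n Q (p.1 + b, p.2 + a)
  let Q := pvAddIf n Q (p.1 - b, p.2 - a)
  let Q := pvAddIf n Q (p.1 - b, p.2 + a)
  let Q := pvAddIf n Q (p.1 + b, p.2 - a)
  Q

-- the `for p in P` body: stops (none) when p is the target (`f = False; break`), else adds p's moves.
-- (A iterates a Python set; the result does not depend on that iteration order: the partially
-- built Q is discarded on break, so iterating P in insertion order is exact.)
def pvScanA (n a b : Int) (P : List (Int × Int)) (Q : PySem.Set (Int × Int)) :
    Option (PySem.Set (Int × Int)) :=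
  match P with
  | [] => some Q
  | p :: ps =>
    if p.1 = n - 1 ∧ p.2 = n - 1 then none
    else pvScanA n a b ps (pvNbrAdds n a b Q p)

-- the `while f` loop; fuel bounds the rounds (proved sufficient: the visited set grows every round).
def pvLoopA (n a b : Int) (fuel : Nat) (P V : PySem.Set (Int × Int)) (flag : Int) : Int :=
  match fuel with
  | 0 => -1  -- never reached for the fuel passed below (each round strictly grows V ⊆ board)
  | fuel + 1 =>
    let flag := flag + 1
    let V := PySem.Set.union V P
    match pvScanA n a b P PySem.Set.empty with
    | none => flag - 1                                     -- `if not f: temp.append(flag - 1)`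
    | some Q =>
      let P' := PySem.Set.diff (PySem.Set.union PySem.Set.empty Q) V
      if P'.length = 0 then -1                             -- `if len(P) == 0: break` … `temp.append(-1)`
      else pvLoopA n a b fuel P' V flag

-- the body of A's inner `for b` loop: one whole `while f` search for the pair (a, b)
def pvSolveA (n a b : Int) : Int :=
  pvLoopA n a b (n.toNat * n.toNat + 2)
    (PySem.Set.add PySem.Set.empty ((0 : Int), (0 : Int))) PySem.Set.empty 0

def knightlOnAChessboard (n : Int) : List (List Int) :=
  (PySem.List.pyRange 1 n 1).map (fun a =>
    (PySem.List.pyRange 1 n 1).map (fun b => pvSolveA n a b))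

-- ===== PORT B =====
-- Python ints here are the nonnegative bitboards / bit positions: represented as Nat
-- (shift amounts may be negative: kept as Int, branched on sign exactly as Source B does).

-- the `N |= (R << s) if s >= 0 else (R >> -s)` loop body
def pvShiftOr (R acc : Nat) (s : Int) : Nat :=
  acc ||| (if 0 ≤ s then R <<< s.toNat else R >>> (-s).toNat)

-- `mask = 0; for x in range(n): mask |= ((1 << n) - 1) << (x * W)`  (W = 2*n, x ≥ 0)
def pvMask (n : Int) : Nat :=
  (PySem.List.pyRange 0 n 1).foldl
    (fun m x => m ||| (((1 <<< n.toNat) - 1) <<< (x.toNat * (2 * n.toNat)))) 0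

-- the `while True` loop; fuel bounds the rounds (proved sufficient: the reached
-- region strictly grows every non-final round and lies inside the n*n-bit mask)
def pvLoopBit (shifts : List Int) (mask tbit : Nat) (fuel : Nat) (flag : Int) (R : Nat) : Int :=
  match fuel with
  | 0 => -1  -- never reached for the fuel passed below
  | fuel + 1 =>
    if (R >>> tbit) &&& 1 ≠ 0 then flag
    else
      let N := shifts.foldl (pvShiftOr R) R
      let N := N &&& mask
      if N = R then -1 else pvLoopBit shifts mask tbit fuel (flag + 1) N

-- Source B's `_solve(n, a, b)`
def pvSolveBit (n a b : Int) : Int :=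
  let W : Int := 2 * n
  let shifts : List Int :=
    ([((a : Int), (b : Int)), (a, -b), (-a, b), (-a, -b),
      (b, a), (b, -a), (-b, a), (-b, -a)]).map (fun m => m.1 * W + m.2)
  let tbit : Nat := ((n - 1) * W + (n - 1)).toNat
  pvLoopBit shifts (pvMask n) tbit (n.toNat * n.toNat + 2) 0 1

def knightlOnAChessboard_alt (n : Int) : List (List Int) :=
  (PySem.List.pyRange 1 n 1).map (fun a =>
    (PySem.List.pyRange 1 n 1).map (fun b => pvSolveBit n a b))

-- ===== PRECONDITION & SPEC =====
def Spec_knightlOnAChessboard (n : Int) (out : List (List Int)) : Prop := out = knightlOnAChessboard_alt n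
instance (n : Int) (out : List (List Int)) : Decidable (Spec_knightlOnAChessboard n out) := by unfold Spec_knightlOnAChessboard; infer_instance

-- ===== CLAIM (what is proved, stated in full; the proofs are below) =====
def Claim_equal_knightlOnAChessboard : Prop := ∀ (n : Int), Dom_knightlOnAChessboard n → Spec_knightlOnAChessboard n (knightlOnAChessboard n)

-- ===== LEMMAS AND PROOFS =====

-- ---- abstract reachability spec (proof-only) ----
def pvInb (n : Int) (c : Int × Int) : Prop := (0 ≤ c.1 ∧ c.1 < n) ∧ (0 ≤ c.2 ∧ c.2 < n)

def pvOffs (a b : Int) : List (Int × Int) :=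
  [(a, b), (a, -b), (-a, b), (-a, -b), (b, a), (b, -a), (-b, a), (-b, -a)]

-- the eight KnightL moves from p that stay on the board, in A's statement order
def pvEdge (n a b : Int) (p c : Int × Int) : Prop :=
  (pvInb n (p.1 + a, p.2 + b) ∧ c = (p.1 + a, p.2 + b)) ∨
  (pvInb n (p.1 + -a, p.2 + -b) ∧ c = (p.1 + -a, p.2 + -b)) ∨
  (pvInb n (p.1 + -a, p.2 + b) ∧ c = (p.1 + -a, p.2 + b)) ∨
  (pvInb n (p.1 + a, p.2 + -b) ∧ c = (p.1 + a, p.2 + -b)) ∨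
  (pvInb n (p.1 + b, p.2 + a) ∧ c = (p.1 + b, p.2 + a)) ∨
  (pvInb n (p.1 + -b, p.2 + -a) ∧ c = (p.1 + -b, p.2 + -a)) ∨
  (pvInb n (p.1 + -b, p.2 + a) ∧ c = (p.1 + -b, p.2 + a)) ∨
  (pvInb n (p.1 + b, p.2 + -a) ∧ c = (p.1 + b, p.2 + -a))

def pvS (n a b : Int) : Nat → (Int × Int) → Prop
  | 0 => fun c => c = (0, 0)
  | k + 1 => fun c => pvS n a b k c ∨ ∃ p, pvS n a b k p ∧ pvEdge n a b p c

def pvFr (n a b : Int) : Nat → (Int × Int) → Prop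
  | 0 => fun c => c = (0, 0)
  | k + 1 => fun c => pvS n a b (k + 1) c ∧ ¬ pvS n a b k c

noncomputable def pvBoard (n : Int) : Finset (Int × Int) := Finset.Icc 0 (n - 1) ×ˢ Finset.Icc 0 (n - 1)

-- ---- spec lemmas ----
theorem pvEdge_inb (n a b : Int) {p c : Int × Int} (he : pvEdge n a b p c) : pvInb n c := by
  rcases he with ⟨h,rfl⟩|⟨h,rfl⟩|⟨h,rfl⟩|⟨h,rfl⟩|⟨h,rfl⟩|⟨h,rfl⟩|⟨h,rfl⟩|⟨h,rfl⟩ <;> exact h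

theorem pvEdge_offs (n a b : Int) (p c : Int × Int) :
    pvEdge n a b p c ↔ pvInb n c ∧ ∃ δ ∈ pvOffs a b, c = (p.1 + δ.1, p.2 + δ.2) := by
  constructor
  · intro he
    refine ⟨pvEdge_inb n a b he, ?_⟩
    rcases he with ⟨h,rfl⟩|⟨h,rfl⟩|⟨h,rfl⟩|⟨h,rfl⟩|⟨h,rfl⟩|⟨h,rfl⟩|⟨h,rfl⟩|⟨h,rfl⟩ <;>
      simp [pvOffs]
  · rintro ⟨hi, δ, hδ, rfl⟩
    simp only [pvOffs, List.mem_cons, List.not_mem_nil, or_false] at hδ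
    unfold pvEdge
    rcases hδ with rfl|rfl|rfl|rfl|rfl|rfl|rfl|rfl
    · exact Or.inl ⟨hi, rfl⟩
    · exact Or.inr (Or.inr (Or.inr (Or.inl ⟨hi, rfl⟩)))
    · exact Or.inr (Or.inr (Or.inl ⟨hi, rfl⟩))
    · exact Or.inr (Or.inl ⟨hi, rfl⟩)
    · exact Or.inr (Or.inr (Or.inr (Or.inr (Or.inl ⟨hi, rfl⟩))))
    · exact Or.inr (Or.inr (Or.inr (Or.inr (Or.inr (Or.inr (Or.inr ⟨hi, rfl⟩))))))
    · exact Or.inr (Or.inr (Or.inr (Or.inr (Or.inr (Or.inr (Or.inl ⟨hi, rfl⟩))))))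
    · exact Or.inr (Or.inr (Or.inr (Or.inr (Or.inr (Or.inl ⟨hi, rfl⟩)))))

theorem pvS_mono (n a b : Int) {j k : Nat} (h : j ≤ k) {c : Int × Int}
    (hc : pvS n a b j c) : pvS n a b k c := by
  induction k with
  | zero => have hj : j = 0 := by omega
            subst hj; exact hc
  | succ k ih =>
    by_cases hjk : j = k + 1
    · subst hjk; exact hc
    · exact Or.inl (ih (by omega))

theorem pvFr_sub (n a b : Int) {k : Nat} {c : Int × Int} (h : pvFr n a b k c) :
    pvS n a b k c := by
  cases k with
  | zero => exact h
  | succ k => exact h.1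

theorem pvS_inb (n a b : Int) (hn : 1 ≤ n) {k : Nat} {c : Int × Int}
    (h : pvS n a b k c) : pvInb n c := by
  induction k with
  | zero => cases h; exact ⟨⟨le_refl 0, by omega⟩, ⟨le_refl 0, by omega⟩⟩
  | succ k ih =>
    rcases h with h | ⟨p, hp, he⟩
    · exact ih h
    · exact pvEdge_inb n a b he

theorem pvFr_unique (n a b : Int) {j k : Nat} {c : Int × Int}
    (hj : pvFr n a b j c) (hk : pvFr n a b k c) : j = k := by
  have key : ∀ {j k : Nat}, j < k → pvFr n a b j c → pvFr n a b k c → False := by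
    intro j k hlt hj hk
    cases k with
    | zero => omega
    | succ k => exact hk.2 (pvS_mono n a b (by omega) (pvFr_sub n a b hj))
  rcases lt_trichotomy j k with h|h|h
  · exact absurd hk (fun hk' => key h hj hk')
  · exact h
  · exact absurd hj (fun hj' => key h hk hj')

theorem pvFr_le (n a b : Int) {j m : Nat} {c : Int × Int}
    (hj : pvFr n a b j c) (hm : pvS n a b m c) : j ≤ m := by
  by_contra hgt
  push_neg at hgt
  cases j with
  | zero => omega
  | succ j => exact hj.2 (pvS_mono n a b (by omega) hm)

theorem pvS_split (n a b : Int) (k : Nat) (c : Int × Int) :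
    pvS n a b (k + 1) c ↔ pvS n a b k c ∨ pvFr n a b (k + 1) c := by
  by_cases hk : pvS n a b k c
  · exact ⟨fun _ => Or.inl hk, fun _ => Or.inl hk⟩
  · constructor
    · intro h; exact Or.inr ⟨h, hk⟩
    · rintro (h | h)
      · exact Or.inl h
      · exact h.1

theorem pvS_stab (n a b : Int) {k : Nat} (h : ∀ c, pvS n a b (k + 1) c → pvS n a b k c)
    {m : Nat} (hm : k ≤ m) : ∀ c, pvS n a b m c → pvS n a b k c := by
  induction m with
  | zero => intro c hc; have : k = 0 := by omega
            subst this; exact hc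
  | succ m ih =>
    by_cases hkm : k = m + 1
    · subst hkm; exact fun c hc => hc
    · intro c hc
      rcases hc with hc | ⟨p, hp, he⟩
      · exact ih (by omega) c hc
      · exact h c (Or.inr ⟨p, ih (by omega) p hp, he⟩)

theorem pvFr_empty_mono (n a b : Int) {K m : Nat} (hK : ∀ c, ¬ pvFr n a b K c)
    (hm : K ≤ m) : ∀ c, ¬ pvFr n a b m c := by
  intro c hc
  cases K with
  | zero => exact hK (0, 0) rfl
  | succ K =>
    have hstab : ∀ c, pvS n a b (K + 1) c → pvS n a b K c := by
      intro c hc'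
      by_contra hnc
      exact hK c ⟨hc', hnc⟩
    cases m with
    | zero => omega
    | succ m =>
      have hKm : K ≤ m := by omega
      exact hc.2 (pvS_mono n a b hKm (pvS_stab n a b hstab (by omega) c hc.1))

theorem pvFr_step (n a b : Int) {k : Nat} {c : Int × Int} :
    pvFr n a b (k + 1) c ↔ (¬ pvS n a b k c ∧ ∃ p, pvFr n a b k p ∧ pvEdge n a b p c) := by
  constructor
  · rintro ⟨hS, hns⟩
    refine ⟨hns, ?_⟩
    classical
    rcases hS with h | ⟨p0, hp0, he0⟩
    · exact absurd h hns
    have hex : ∃ jp : Nat, ∃ p, pvS n a b jp p ∧ pvEdge n a b p c := ⟨k, p0, hp0, he0⟩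
    obtain ⟨p, hp, he⟩ := Nat.find_spec hex
    have hj0k : Nat.find hex ≤ k := Nat.find_min' hex ⟨p0, hp0, he0⟩
    have hnotlt : ¬ Nat.find hex < k := by
      intro hlt
      have hS1 : pvS n a b (Nat.find hex + 1) c := Or.inr ⟨p, hp, he⟩
      exact hns (pvS_mono n a b (by omega) hS1)
    have hj0e : Nat.find hex = k := by omega
    rw [hj0e] at hp
    refine ⟨p, ?_, he⟩
    cases hk : k with
    | zero => rw [hk] at hp; exact hp
    | succ k' =>
      rw [hk] at hp
      refine ⟨hp, fun hS' => ?_⟩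
      exact Nat.find_min hex (by omega) ⟨p, hS', he⟩
  · rintro ⟨hns, p, hp, he⟩
    exact ⟨Or.inr ⟨p, pvFr_sub n a b hp, he⟩, hns⟩

theorem pvBoard_mem (n : Int) {c : Int × Int} : c ∈ pvBoard n ↔ pvInb n c := by
  simp only [pvBoard, Finset.mem_product, Finset.mem_Icc, pvInb]
  omega

theorem pvBoard_card (n : Int) : (pvBoard n).card = n.toNat * n.toNat := by
  have h : (n - 1 + 1 - 0 : Int) = n := by ring
  rw [pvBoard, Finset.card_product, Int.card_Icc, h]

theorem pvFr_card_bound (n a b : Int) (hn : 1 ≤ n) {m : Nat}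
    (h : ∃ c, pvFr n a b m c) : m < n.toNat * n.toNat := by
  classical
  by_contra hm
  push_neg at hm
  have hne : ∀ j, j ≤ m → ∃ c, pvFr n a b j c := by
    intro j hj
    by_contra hemp
    push_neg at hemp
    obtain ⟨c, hc⟩ := h
    exact pvFr_empty_mono n a b hemp hj c hc
  set f : Nat → Int × Int := fun j => if hj : ∃ c, pvFr n a b j c then hj.choose else (0, 0) with hf
  have hmaps : ∀ j ∈ Finset.range (m + 1), f j ∈ pvBoard n := by
    intro j hj
    simp only [Finset.mem_range] at hj
    have hj' := hne j (by omega)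
    simp only [hf, dif_pos hj']
    exact (pvBoard_mem n).mpr (pvS_inb n a b hn (pvFr_sub n a b hj'.choose_spec))
  have hinj : Set.InjOn f (Finset.range (m + 1)) := by
    intro i hi j hj hij
    simp only [Finset.coe_range, Set.mem_Iio] at hi hj
    have hi' := hne i (by omega)
    have hj' := hne j (by omega)
    simp only [hf, dif_pos hi', dif_pos hj'] at hij
    exact pvFr_unique n a b (hij ▸ hi'.choose_spec) hj'.choose_spec
  have hcard := Finset.card_le_card_of_injOn f hmaps hinj
  rw [Finset.card_range, pvBoard_card] at hcard
  omega

theorem pvReach_fr (n a b : Int) {c : Int × Int} {j : Nat} (h : pvS n a b j c) :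
    ∃ i, pvFr n a b i c := by
  classical
  have hex : ∃ i, pvS n a b i c := ⟨j, h⟩
  have hi := Nat.find_spec hex
  refine ⟨Nat.find hex, ?_⟩
  cases hfind : Nat.find hex with
  | zero => rw [hfind] at hi; exact hi
  | succ i =>
    rw [hfind] at hi
    exact ⟨hi, fun hS => Nat.find_min hex (by omega) hS⟩

-- ---- port A lemmas ----
theorem mem_pvAddIf (n : Int) (Q : PySem.Set (Int × Int)) (c x : Int × Int) :
    x ∈ pvAddIf n Q c ↔ x ∈ Q ∨ (pvInb n c ∧ x = c) := by
  unfold pvAddIf pvInb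
  split_ifs with h
  · simp only [PySem.Set.mem_add]; tauto
  · tauto

theorem mem_pvNbrAdds (n a b : Int) (Q : PySem.Set (Int × Int)) (p x : Int × Int) :
    x ∈ pvNbrAdds n a b Q p ↔ x ∈ Q ∨ pvEdge n a b p x := by
  simp only [pvNbrAdds, mem_pvAddIf, sub_eq_add_neg, pvEdge, or_assoc]

theorem pvScanA_none_iff (n a b : Int) (P : List (Int × Int)) (Q : PySem.Set (Int × Int)) :
    pvScanA n a b P Q = none ↔ ((n - 1 : Int), (n - 1 : Int)) ∈ P := by
  induction P generalizing Q with
  | nil => simp [pvScanA]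
  | cons p ps ih =>
    simp only [pvScanA]
    split_ifs with h
    · simp only [List.mem_cons, true_iff]
      exact Or.inl (by rw [Prod.ext_iff]; exact ⟨h.1.symm, h.2.symm⟩)
    · rw [ih]
      simp only [List.mem_cons]
      constructor
      · exact fun h' => Or.inr h'
      · rintro (h' | h')
        · exact absurd ⟨congrArg Prod.fst h'.symm, congrArg Prod.snd h'.symm⟩ h
        · exact h'

theorem pvScanA_some (n a b : Int) (P : List (Int × Int)) (Q : PySem.Set (Int × Int))
    (h : ((n - 1 : Int), (n - 1 : Int)) ∉ P) :
    ∃ Q', pvScanA n a b P Q = some Q' ∧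
      ∀ x, x ∈ Q' ↔ (x ∈ Q ∨ ∃ p ∈ P, pvEdge n a b p x) := by
  induction P generalizing Q with
  | nil => exact ⟨Q, rfl, by simp⟩
  | cons p ps ih =>
    have hpt : ¬(p.1 = n - 1 ∧ p.2 = n - 1) := by
      intro hc
      exact h (List.mem_cons.mpr (Or.inl (by rw [Prod.ext_iff]; exact ⟨hc.1.symm, hc.2.symm⟩)))
    simp only [pvScanA, if_neg hpt]
    obtain ⟨Q', hQ', hmem⟩ := ih (pvNbrAdds n a b Q p) (fun hc => h (List.mem_cons_of_mem _ hc))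
    refine ⟨Q', hQ', fun x => ?_⟩
    rw [hmem x]
    simp only [mem_pvNbrAdds, List.mem_cons]
    constructor
    · rintro ((hx | he) | ⟨p', hp', he⟩)
      · exact Or.inl hx
      · exact Or.inr ⟨p, Or.inl rfl, he⟩
      · exact Or.inr ⟨p', Or.inr hp', he⟩
    · rintro (hx | ⟨p', (rfl | hp'), he⟩)
      · exact Or.inl (Or.inl hx)
      · exact Or.inl (Or.inr he)
      · exact Or.inr ⟨p', hp', he⟩

theorem pvLoopA_found (n a b : Int) {j : Nat} (hj : pvFr n a b j ((n - 1 : Int), (n - 1 : Int))) :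
    ∀ fuel k (P V : PySem.Set (Int × Int)), k ≤ j → j - k < fuel →
      (∀ c, c ∈ P ↔ pvFr n a b k c) →
      (∀ c, c ∈ V ↔ (k ≠ 0 ∧ pvS n a b (k - 1) c)) →
      pvLoopA n a b fuel P V (k : Int) = (j : Int) := by
  intro fuel
  induction fuel with
  | zero => intro k P V hk hfuel hP hV; omega
  | succ f ihf =>
    intro k P V hkj hfuel hP hV
    simp only [pvLoopA]
    by_cases hkje : k = j
    · subst hkje
      have hnone : pvScanA n a b P PySem.Set.empty = none :=
        (pvScanA_none_iff n a b P _).mpr ((hP _).mpr hj)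
      rw [hnone]
      push_cast
      ring
    · have htP : ((n - 1 : Int), (n - 1 : Int)) ∉ P :=
        fun hc => hkje (pvFr_unique n a b ((hP _).mp hc) hj)
      obtain ⟨Q', hQ', hQm⟩ := pvScanA_some n a b P _ htP
      rw [hQ']
      show (if (PySem.Set.diff (PySem.Set.union PySem.Set.empty Q') (PySem.Set.union V P)).length = 0 then (-1 : Int)
          else pvLoopA n a b f (PySem.Set.diff (PySem.Set.union PySem.Set.empty Q') (PySem.Set.union V P))
            (PySem.Set.union V P) ((k : Int) + 1)) = _
      have hVm : ∀ c, c ∈ PySem.Set.union V P ↔ pvS n a b k c := by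
        intro c
        rw [PySem.Set.mem_union, hV c, hP c]
        cases k with
        | zero => simp only [ne_eq, not_true_eq_false, false_and, false_or]; exact Iff.rfl
        | succ k' =>
          simp only [ne_eq, Nat.succ_ne_zero, not_false_eq_true, true_and,
            Nat.add_sub_cancel]
          exact (pvS_split n a b k' c).symm
      have hPm : ∀ c, c ∈ PySem.Set.diff (PySem.Set.union PySem.Set.empty Q') (PySem.Set.union V P) ↔
          pvFr n a b (k + 1) c := by
        intro c
        rw [PySem.Set.mem_diff, PySem.Set.mem_union, hVm c, hQm c, pvFr_step n a b]
        simp only [PySem.Set.empty, List.not_mem_nil, false_or]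
        constructor
        · rintro ⟨⟨p, hp, he⟩, hns⟩
          exact ⟨hns, p, (hP p).mp hp, he⟩
        · rintro ⟨hns, p, hp, he⟩
          exact ⟨⟨p, (hP p).mpr hp, he⟩, hns⟩
      by_cases hPe : (PySem.Set.diff (PySem.Set.union PySem.Set.empty Q') (PySem.Set.union V P)).length = 0
      · exfalso
        have hne : ∃ c, pvFr n a b (k + 1) c := by
          by_contra hemp
          push_neg at hemp
          exact pvFr_empty_mono n a b hemp (by omega) _ hj
        obtain ⟨c, hc⟩ := hne
        have hmem := (hPm c).mpr hc
        have := List.ne_nil_of_mem hmem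
        rw [← List.length_pos_iff] at this
        omega
      · rw [if_neg hPe]
        have hcast : ((k : Int) + 1) = ((k + 1 : Nat) : Int) := by push_cast; ring
        rw [hcast]
        refine ihf (k + 1) _ _ (by omega) (by omega) hPm ?_
        intro c
        rw [hVm c]
        simp only [ne_eq, Nat.succ_ne_zero, not_false_eq_true, true_and, Nat.add_sub_cancel]

theorem pvLoopA_unreach (n a b : Int)
    (hun : ∀ j, ¬ pvS n a b j ((n - 1 : Int), (n - 1 : Int)))
    {K : Nat} (hK : ∀ c, ¬ pvFr n a b K c) :
    ∀ fuel k (P V : PySem.Set (Int × Int)), K - k < fuel →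
      (∀ c, c ∈ P ↔ pvFr n a b k c) →
      (∀ c, c ∈ V ↔ (k ≠ 0 ∧ pvS n a b (k - 1) c)) →
      pvLoopA n a b fuel P V (k : Int) = -1 := by
  intro fuel
  induction fuel with
  | zero => intro k P V hfuel hP hV; omega
  | succ f ihf =>
    intro k P V hfuel hP hV
    simp only [pvLoopA]
    have htP : ((n - 1 : Int), (n - 1 : Int)) ∉ P :=
      fun hc => hun k (pvFr_sub n a b ((hP _).mp hc))
    obtain ⟨Q', hQ', hQm⟩ := pvScanA_some n a b P _ htP
    rw [hQ']
    show (if (PySem.Set.diff (PySem.Set.union PySem.Set.empty Q') (PySem.Set.union V P)).length = 0 then (-1 : Int)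
        else pvLoopA n a b f (PySem.Set.diff (PySem.Set.union PySem.Set.empty Q') (PySem.Set.union V P))
          (PySem.Set.union V P) ((k : Int) + 1)) = _
    have hVm : ∀ c, c ∈ PySem.Set.union V P ↔ pvS n a b k c := by
      intro c
      rw [PySem.Set.mem_union, hV c, hP c]
      cases k with
      | zero => simp only [ne_eq, not_true_eq_false, false_and, false_or]; exact Iff.rfl
      | succ k' =>
        simp only [ne_eq, Nat.succ_ne_zero, not_false_eq_true, true_and, Nat.add_sub_cancel]
        exact (pvS_split n a b k' c).symm
    have hPm : ∀ c, c ∈ PySem.Set.diff (PySem.Set.union PySem.Set.empty Q') (PySem.Set.union V P) ↔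
        pvFr n a b (k + 1) c := by
      intro c
      rw [PySem.Set.mem_diff, PySem.Set.mem_union, hVm c, hQm c, pvFr_step n a b]
      simp only [PySem.Set.empty, List.not_mem_nil, false_or]
      constructor
      · rintro ⟨⟨p, hp, he⟩, hns⟩
        exact ⟨hns, p, (hP p).mp hp, he⟩
      · rintro ⟨hns, p, hp, he⟩
        exact ⟨⟨p, (hP p).mpr hp, he⟩, hns⟩
    by_cases hPe : (PySem.Set.diff (PySem.Set.union PySem.Set.empty Q') (PySem.Set.union V P)).length = 0
    · rw [if_pos hPe]
    · rw [if_neg hPe]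
      have hne : ∃ c, pvFr n a b (k + 1) c := by
        have hnil : PySem.Set.diff (PySem.Set.union PySem.Set.empty Q') (PySem.Set.union V P) ≠ [] := by
          intro hnil
          rw [hnil] at hPe
          exact hPe rfl
        rcases List.exists_mem_of_ne_nil _ hnil with ⟨c, hc⟩
        exact ⟨c, (hPm c).mp hc⟩
      have hkK : k + 1 ≤ K := by
        by_contra hgt
        push_neg at hgt
        obtain ⟨c, hc⟩ := hne
        exact pvFr_empty_mono n a b hK (by omega) c hc
      have hcast : ((k : Int) + 1) = ((k + 1 : Nat) : Int) := by push_cast; ring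
      rw [hcast]
      refine ihf (k + 1) _ _ (by omega) hPm ?_
      intro c
      rw [hVm c]
      simp only [ne_eq, Nat.succ_ne_zero, not_false_eq_true, true_and, Nat.add_sub_cancel]

theorem pvInitP (n a b : Int) : ∀ c : Int × Int,
    c ∈ PySem.Set.add PySem.Set.empty ((0 : Int), (0 : Int)) ↔ pvFr n a b 0 c := by
  intro c
  show c ∈ [((0 : Int), (0 : Int))] ↔ _
  simp only [List.mem_singleton]
  exact Iff.rfl

theorem pvInitV (n a b : Int) : ∀ c : Int × Int,
    c ∈ (PySem.Set.empty : PySem.Set (Int × Int)) ↔ ((0 : Nat) ≠ 0 ∧ pvS n a b (0 - 1) c) := by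
  intro c
  simp [PySem.Set.empty]

theorem pvSolveA_found (n a b : Int) (hn : 1 ≤ n) {j : Nat}
    (hj : pvFr n a b j ((n - 1 : Int), (n - 1 : Int))) : pvSolveA n a b = (j : Int) := by
  have hjb : j < n.toNat * n.toNat := pvFr_card_bound n a b hn ⟨_, hj⟩
  have hA := pvLoopA_found n a b hj (n.toNat * n.toNat + 2) 0 _ _ (by omega) (by omega)
    (pvInitP n a b) (pvInitV n a b)
  rw [Nat.cast_zero] at hA
  exact hA

theorem pvSolveA_unreach (n a b : Int) (hn : 1 ≤ n)
    (hun' : ∀ i, ¬ pvFr n a b i ((n - 1 : Int), (n - 1 : Int))) : pvSolveA n a b = -1 := by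
  have hun : ∀ j, ¬ pvS n a b j ((n - 1 : Int), (n - 1 : Int)) := by
    intro j hS
    obtain ⟨i, hi⟩ := pvReach_fr n a b hS
    exact hun' i hi
  have hK : ∀ c, ¬ pvFr n a b (n.toNat * n.toNat) c := by
    intro c hc
    exact absurd (pvFr_card_bound n a b hn ⟨c, hc⟩) (lt_irrefl _)
  have hA := pvLoopA_unreach n a b hun hK (n.toNat * n.toNat + 2) 0 _ _ (by omega)
    (pvInitP n a b) (pvInitV n a b)
  rw [Nat.cast_zero] at hA
  exact hA

-- ---- port B lemmas: the bitboard against the reachability spec ----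

def pvBitIdx (n x y : Int) : Nat := (x * (2 * n) + y).toNat

def pvBounded (n : Int) (R : Nat) : Prop :=
  ∀ i : Nat, R.testBit i = true →
    ∃ x y : Int, (0 ≤ x ∧ x < n) ∧ (0 ≤ y ∧ y < n) ∧ i = pvBitIdx n x y

def pvInvBit (n a b : Int) (k : Nat) (R : Nat) : Prop :=
  pvBounded n R ∧
  ∀ x y : Int, 0 ≤ x → x < n → 0 ≤ y → y < n →
    (R.testBit (pvBitIdx n x y) = true ↔ pvS n a b k (x, y))

def pvShifts (n a b : Int) : List Int := (pvOffs a b).map (fun m => m.1 * (2 * n) + m.2)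

theorem pvTestBitOne (i : Nat) : (1 : Nat).testBit i = decide (i = 0) := by
  cases i with
  | zero => rfl
  | succ k => simp [Nat.testBit_succ]

theorem pvCondIff (R t : Nat) : ((R >>> t) &&& 1 ≠ 0) ↔ R.testBit t = true := by
  simp [Nat.testBit, Nat.land_comm, Nat.and_one_is_mod]

theorem pvMulSmall (n t r : Int) (hn : 1 ≤ n) (h : t * (2 * n) = r)
    (hlo : -(2 * n) < r) (hhi : r < 2 * n) : t = 0 ∧ r = 0 := by
  rcases eq_or_ne t 0 with rfl | ht
  · refine ⟨rfl, by simpa using h.symm⟩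
  · exfalso
    have hr0 : r ≠ 0 := by
      intro h0
      rw [h0] at h
      rcases mul_eq_zero.mp h with h' | h'
      · exact ht h'
      · omega
    have hdvd : (2 * n) ∣ |r| := (dvd_abs _ _).mpr ⟨t, by linarith [h]⟩
    have habs := Int.le_of_dvd (abs_pos.mpr hr0) hdvd
    have := abs_lt.mpr ⟨hlo, hhi⟩
    omega

theorem pvBitIdx_toNat (n x y : Int) (hn : 0 ≤ n) (hx : 0 ≤ x) (hy : 0 ≤ y) :
    ((pvBitIdx n x y : Nat) : Int) = x * (2 * n) + y := by
  rw [pvBitIdx, Int.toNat_of_nonneg (add_nonneg (mul_nonneg hx (by linarith)) hy)]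

theorem pvCoordEq (n x y x' y' dx dy : Int) (hn : 1 ≤ n)
    (hy : 0 ≤ y) (hyn : y < n) (hy' : 0 ≤ y') (hy'n : y' < n)
    (hdy1 : -n < dy) (hdy2 : dy < n)
    (h : x * (2 * n) + y = x' * (2 * n) + y' + (dx * (2 * n) + dy)) :
    x = x' + dx ∧ y = y' + dy := by
  have h2 : (x - x' - dx) * (2 * n) = y' + dy - y := by linear_combination h
  obtain ⟨ht, hr⟩ := pvMulSmall n _ _ hn h2 (by omega) (by omega)
  exact ⟨by omega, by omega⟩

theorem pvShiftBit (n : Int) (hn : 1 ≤ n) (R : Nat) (hR : pvBounded n R)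
    (dx dy : Int) (hdy1 : -n < dy) (hdy2 : dy < n) (x y : Int)
    (hx : 0 ≤ x) (hxn : x < n) (hy : 0 ≤ y) (hyn : y < n) :
    ((if 0 ≤ dx * (2 * n) + dy then R <<< (dx * (2 * n) + dy).toNat
      else R >>> (-(dx * (2 * n) + dy)).toNat).testBit (pvBitIdx n x y) = true) ↔
    ∃ x' y' : Int, (0 ≤ x' ∧ x' < n) ∧ (0 ≤ y' ∧ y' < n) ∧
      R.testBit (pvBitIdx n x' y') = true ∧ x = x' + dx ∧ y = y' + dy := by
  have hi : ((pvBitIdx n x y : Nat) : Int) = x * (2 * n) + y := pvBitIdx_toNat n x y (by omega) hx hy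
  split_ifs with hsgn
  · have hst : (((dx * (2 * n) + dy).toNat : Nat) : Int) = dx * (2 * n) + dy :=
      Int.toNat_of_nonneg hsgn
    rw [Nat.testBit_shiftLeft, Bool.and_eq_true, decide_eq_true_iff]
    constructor
    · rintro ⟨hge, hbit⟩
      obtain ⟨x', y', hx', hy', hj⟩ := hR _ hbit
      have hj' : ((pvBitIdx n x' y' : Nat) : Int) = x' * (2 * n) + y' :=
        pvBitIdx_toNat n x' y' (by omega) hx'.1 hy'.1
      have hij : ((pvBitIdx n x y : Nat) : Int) =
          ((pvBitIdx n x' y' : Nat) : Int) + (dx * (2 * n) + dy) := by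
        rw [← hj]
        omega
      rw [hi, hj'] at hij
      obtain ⟨hxe, hye⟩ := pvCoordEq n x y x' y' dx dy hn hy hyn hy'.1 hy'.2 hdy1 hdy2 hij
      exact ⟨x', y', hx', hy', by rw [← hj]; exact hbit, hxe, hye⟩
    · rintro ⟨x', y', hx', hy', hbit, hxe, hye⟩
      have hj' : ((pvBitIdx n x' y' : Nat) : Int) = x' * (2 * n) + y' :=
        pvBitIdx_toNat n x' y' (by omega) hx'.1 hy'.1
      have hij : ((pvBitIdx n x y : Nat) : Int) =
          ((pvBitIdx n x' y' : Nat) : Int) + (dx * (2 * n) + dy) := by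
        rw [hi, hj', hxe, hye]
        ring
      refine ⟨by omega, ?_⟩
      have : pvBitIdx n x y - (dx * (2 * n) + dy).toNat = pvBitIdx n x' y' := by omega
      rw [this]
      exact hbit
  · push_neg at hsgn
    have hst : (((-(dx * (2 * n) + dy)).toNat : Nat) : Int) = -(dx * (2 * n) + dy) :=
      Int.toNat_of_nonneg (by omega)
    rw [Nat.testBit_shiftRight]
    constructor
    · intro hbit
      obtain ⟨x', y', hx', hy', hj⟩ := hR _ hbit
      have hj' : ((pvBitIdx n x' y' : Nat) : Int) = x' * (2 * n) + y' :=
        pvBitIdx_toNat n x' y' (by omega) hx'.1 hy'.1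
      have hij : ((pvBitIdx n x y : Nat) : Int) =
          ((pvBitIdx n x' y' : Nat) : Int) + (dx * (2 * n) + dy) := by
        rw [← hj]
        push_cast
        omega
      rw [hi, hj'] at hij
      obtain ⟨hxe, hye⟩ := pvCoordEq n x y x' y' dx dy hn hy hyn hy'.1 hy'.2 hdy1 hdy2 hij
      exact ⟨x', y', hx', hy', by rw [← hj]; exact hbit, hxe, hye⟩
    · rintro ⟨x', y', hx', hy', hbit, hxe, hye⟩
      have hj' : ((pvBitIdx n x' y' : Nat) : Int) = x' * (2 * n) + y' :=
        pvBitIdx_toNat n x' y' (by omega) hx'.1 hy'.1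
      have hij : ((pvBitIdx n x y : Nat) : Int) =
          ((pvBitIdx n x' y' : Nat) : Int) + (dx * (2 * n) + dy) := by
        rw [hi, hj', hxe, hye]
        ring
      have : (-(dx * (2 * n) + dy)).toNat + pvBitIdx n x y = pvBitIdx n x' y' := by omega
      rw [this]
      exact hbit

theorem pvMaskAux (n : Int) (hn0 : 0 ≤ n) :
    ∀ (k : Nat), (k : Int) ≤ n → ∀ i : Nat,
      (((PySem.List.pyRange 0 (k : Int) 1).foldl
          (fun m x => m ||| (((1 <<< n.toNat) - 1) <<< (x.toNat * (2 * n.toNat)))) 0).testBit i = true ↔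
        ∃ x y : Int, (0 ≤ x ∧ x < (k : Int)) ∧ (0 ≤ y ∧ y < n) ∧ i = pvBitIdx n x y) := by
  have hNn : ((n.toNat : Nat) : Int) = n := Int.toNat_of_nonneg hn0
  intro k
  induction k with
  | zero =>
    intro _ i
    have hempty : PySem.List.pyRange 0 ((0 : Nat) : Int) 1 = [] := by
      rw [List.eq_nil_iff_forall_not_mem]
      intro z hz
      rw [PySem.List.mem_pyRange_one] at hz
      omega
    rw [hempty]
    simp only [List.foldl_nil, Nat.zero_testBit]
    constructor
    · intro h; exact absurd h (by simp)
    · rintro ⟨x, y, hx, _, _⟩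
      have : ((0 : Nat) : Int) = 0 := rfl
      omega
  | succ k ih =>
    intro hk i
    have hsplit : PySem.List.pyRange 0 (((k + 1 : Nat)) : Int) 1 =
        PySem.List.pyRange 0 ((k : Nat) : Int) 1 ++ [((k : Nat) : Int)] := by
      have hcast : (((k + 1 : Nat)) : Int) = ((k : Nat) : Int) + 1 := by push_cast; ring
      rw [hcast, PySem.List.pyRange_one_succ_right (by positivity)]
    rw [hsplit, List.foldl_append]
    simp only [List.foldl_cons, List.foldl_nil]
    rw [Nat.testBit_or, Bool.or_eq_true, ih (by omega) i]
    have hterm : ((((1 <<< n.toNat) - 1) <<<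
        ((((k : Nat) : Int)).toNat * (2 * n.toNat))).testBit i = true) ↔
        ∃ y : Int, (0 ≤ y ∧ y < n) ∧ i = pvBitIdx n ((k : Nat) : Int) y := by
      rw [Int.toNat_natCast, Nat.testBit_shiftLeft, Bool.and_eq_true, decide_eq_true_iff,
        Nat.shiftLeft_eq, one_mul, Nat.testBit_two_pow_sub_one, decide_eq_true_iff]
      have hprod : ((k * (2 * n.toNat) : Nat) : Int) = (k : Int) * (2 * n) := by
        push_cast [hNn]
        ring
      constructor
      · rintro ⟨hge, hlt⟩
        refine ⟨((i - k * (2 * n.toNat) : Nat) : Int), ⟨by positivity, by omega⟩, ?_⟩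
        have hpv : ((pvBitIdx n ((k : Nat) : Int) ((i - k * (2 * n.toNat) : Nat) : Int) : Nat) : Int)
            = (k : Int) * (2 * n) + ((i - k * (2 * n.toNat) : Nat) : Int) :=
          pvBitIdx_toNat n _ _ hn0 (by positivity) (by positivity)
        omega
      · rintro ⟨y, ⟨hy0, hyn⟩, rfl⟩
        have hpv : ((pvBitIdx n ((k : Nat) : Int) y : Nat) : Int) = (k : Int) * (2 * n) + y :=
          pvBitIdx_toNat n _ _ hn0 (by positivity) hy0
        constructor
        · omega
        · omega
    rw [hterm]
    constructor
    · rintro (⟨x, y, hx, hy, rfl⟩ | ⟨y, hy, rfl⟩)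
      · exact ⟨x, y, ⟨hx.1, by push_cast; omega⟩, hy, rfl⟩
      · exact ⟨((k : Nat) : Int), y, ⟨by positivity, by push_cast; omega⟩, hy, rfl⟩
    · rintro ⟨x, y, hx, hy, rfl⟩
      by_cases hxk : x < ((k : Nat) : Int)
      · exact Or.inl ⟨x, y, ⟨hx.1, hxk⟩, hy, rfl⟩
      · have : x = ((k : Nat) : Int) := by push_cast at hx ⊢; omega
        subst this
        exact Or.inr ⟨y, hy, rfl⟩

theorem pvMask_testBit (n : Int) (hn0 : 0 ≤ n) (i : Nat) :
    ((pvMask n).testBit i = true) ↔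
      ∃ x y : Int, (0 ≤ x ∧ x < n) ∧ (0 ≤ y ∧ y < n) ∧ i = pvBitIdx n x y := by
  have h := pvMaskAux n hn0 n.toNat (by omega) i
  rw [Int.toNat_of_nonneg hn0] at h
  unfold pvMask
  exact h

theorem pvFoldOr_testBit (R : Nat) (ss : List Int) : ∀ (R0 i : Nat),
    (((ss.foldl (pvShiftOr R) R0).testBit i = true) ↔
      (R0.testBit i = true ∨ ∃ s ∈ ss,
        ((if 0 ≤ s then R <<< s.toNat else R >>> (-s).toNat).testBit i = true))) := by
  induction ss with
  | nil => intro R0 i; simp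
  | cons s rest ih =>
    intro R0 i
    simp only [List.foldl_cons, pvShiftOr]
    rw [ih]
    rw [Nat.testBit_or, Bool.or_eq_true]
    simp only [List.mem_cons]
    constructor
    · rintro ((h | h) | ⟨s', hs', h⟩)
      · exact Or.inl h
      · exact Or.inr ⟨s, Or.inl rfl, h⟩
      · exact Or.inr ⟨s', Or.inr hs', h⟩
    · rintro (h | ⟨s', (rfl | hs'), h⟩)
      · exact Or.inl (Or.inl h)
      · exact Or.inl (Or.inr h)
      · exact Or.inr ⟨s', hs', h⟩

theorem pvOffs_bounds (a b : Int) (ha : 1 ≤ a) (han : a < n) (hb : 1 ≤ b) (hbn : b < n)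
    {m : Int × Int} (hm : m ∈ pvOffs a b) : -n < m.2 ∧ m.2 < n := by
  simp only [pvOffs, List.mem_cons, List.not_mem_nil, or_false] at hm
  rcases hm with rfl | rfl | rfl | rfl | rfl | rfl | rfl | rfl <;> simp <;> omega

theorem pvStepBit (n a b : Int) (hn : 1 ≤ n) (ha : 1 ≤ a) (han : a < n)
    (hb : 1 ≤ b) (hbn : b < n) (k : Nat) (R : Nat) (hInv : pvInvBit n a b k R) :
    pvInvBit n a b (k + 1) (((pvShifts n a b).foldl (pvShiftOr R) R) &&& pvMask n) := by
  obtain ⟨hB, hbits⟩ := hInv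
  constructor
  · intro i hi
    rw [Nat.testBit_and, Bool.and_eq_true] at hi
    exact (pvMask_testBit n (by omega) i).mp hi.2
  · intro x y hx hxn hy hyn
    rw [Nat.testBit_and,
      (pvMask_testBit n (by omega) _).mpr ⟨x, y, ⟨hx, hxn⟩, ⟨hy, hyn⟩, rfl⟩,
      Bool.and_true, pvFoldOr_testBit]
    show _ ↔ (pvS n a b k (x, y) ∨ ∃ p, pvS n a b k p ∧ pvEdge n a b p (x, y))
    rw [hbits x y hx hxn hy hyn]
    constructor
    · rintro (h | ⟨s, hs, hbit⟩)
      · exact Or.inl h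
      · obtain ⟨m, hm, rfl⟩ := List.mem_map.mp hs
        obtain ⟨hd1, hd2⟩ := pvOffs_bounds a b ha han hb hbn hm
        obtain ⟨x', y', hx', hy', hbit', hxe, hye⟩ :=
          (pvShiftBit n hn R hB m.1 m.2 hd1 hd2 x y hx hxn hy hyn).mp hbit
        refine Or.inr ⟨(x', y'), (hbits x' y' hx'.1 hx'.2 hy'.1 hy'.2).mp hbit', ?_⟩
        exact (pvEdge_offs n a b _ _).mpr
          ⟨⟨⟨hx, hxn⟩, ⟨hy, hyn⟩⟩, m, hm, by rw [Prod.ext_iff]; exact ⟨hxe, hye⟩⟩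
    · rintro (h | ⟨p, hp, hedge⟩)
      · exact Or.inl h
      · obtain ⟨_, δ, hδ, hc⟩ := (pvEdge_offs n a b p (x, y)).mp hedge
        obtain ⟨hd1, hd2⟩ := pvOffs_bounds a b ha han hb hbn hδ
        have hpinb : pvInb n p := pvS_inb n a b hn hp
        refine Or.inr ⟨δ.1 * (2 * n) + δ.2, List.mem_map.mpr ⟨δ, hδ, rfl⟩, ?_⟩
        refine (pvShiftBit n hn R hB δ.1 δ.2 hd1 hd2 x y hx hxn hy hyn).mpr
          ⟨p.1, p.2, hpinb.1, hpinb.2, ?_, congrArg Prod.fst hc, congrArg Prod.snd hc⟩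
        exact (hbits p.1 p.2 hpinb.1.1 hpinb.1.2 hpinb.2.1 hpinb.2.2).mpr (by
          rw [Prod.mk.eta]; exact hp)

theorem pvLoopBit_found (n a b : Int) (hn : 1 ≤ n) (ha : 1 ≤ a) (han : a < n)
    (hb : 1 ≤ b) (hbn : b < n) {j : Nat}
    (hj : pvFr n a b j ((n - 1 : Int), (n - 1 : Int))) :
    ∀ fuel k (R : Nat), k ≤ j → j - k < fuel → pvInvBit n a b k R →
      pvLoopBit (pvShifts n a b) (pvMask n) (pvBitIdx n (n - 1) (n - 1)) fuel (k : Int) R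
        = (j : Int) := by
  intro fuel
  induction fuel with
  | zero => intro k R hkj hfuel _; omega
  | succ f ihf =>
    intro k R hkj hfuel hInv
    have htb := hInv.2 (n - 1) (n - 1) (by omega) (by omega) (by omega) (by omega)
    simp only [pvLoopBit]
    by_cases hkje : k = j
    · subst hkje
      rw [if_pos ((pvCondIff R _).mpr (htb.mpr (pvFr_sub n a b hj)))]
    · have hcond : ¬ ((R >>> pvBitIdx n (n - 1) (n - 1)) &&& 1 ≠ 0) := by
        rw [pvCondIff, htb]
        intro hS
        have := pvFr_le n a b hj hS
        omega
      rw [if_neg hcond]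
      show (if ((pvShifts n a b).foldl (pvShiftOr R) R) &&& pvMask n = R then (-1 : Int)
        else pvLoopBit (pvShifts n a b) (pvMask n) (pvBitIdx n (n - 1) (n - 1)) f
          ((k : Int) + 1) (((pvShifts n a b).foldl (pvShiftOr R) R) &&& pvMask n)) = _
      have hInv' := pvStepBit n a b hn ha han hb hbn k R hInv
      have hne : ∃ c, pvFr n a b (k + 1) c := by
        by_contra hemp
        push_neg at hemp
        exact pvFr_empty_mono n a b hemp (by omega) _ hj
      obtain ⟨c, hc⟩ := hne
      have hcinb : pvInb n c := pvS_inb n a b hn (pvFr_sub n a b hc)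
      have hNbit : (((pvShifts n a b).foldl (pvShiftOr R) R) &&& pvMask n).testBit
          (pvBitIdx n c.1 c.2) = true := by
        rw [hInv'.2 c.1 c.2 hcinb.1.1 hcinb.1.2 hcinb.2.1 hcinb.2.2, Prod.mk.eta]
        exact hc.1
      have hRbit : R.testBit (pvBitIdx n c.1 c.2) = false := by
        rw [← Bool.not_eq_true, hInv.2 c.1 c.2 hcinb.1.1 hcinb.1.2 hcinb.2.1 hcinb.2.2,
          Prod.mk.eta]
        exact hc.2
      have hNR : ((pvShifts n a b).foldl (pvShiftOr R) R) &&& pvMask n ≠ R := by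
        intro hEq
        rw [hEq, hRbit] at hNbit
        exact absurd hNbit (by simp)
      rw [if_neg hNR]
      have hcast : ((k : Int) + 1) = ((k + 1 : Nat) : Int) := by push_cast; ring
      rw [hcast]
      exact ihf (k + 1) _ (by omega) (by omega) hInv'

theorem pvLoopBit_unreach (n a b : Int) (hn : 1 ≤ n) (ha : 1 ≤ a) (han : a < n)
    (hb : 1 ≤ b) (hbn : b < n)
    (hun : ∀ j, ¬ pvS n a b j ((n - 1 : Int), (n - 1 : Int)))
    {K : Nat} (hK : ∀ c, ¬ pvFr n a b K c) :
    ∀ fuel k (R : Nat), K - k < fuel → pvInvBit n a b k R →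
      pvLoopBit (pvShifts n a b) (pvMask n) (pvBitIdx n (n - 1) (n - 1)) fuel (k : Int) R
        = -1 := by
  intro fuel
  induction fuel with
  | zero => intro k R hfuel _; omega
  | succ f ihf =>
    intro k R hfuel hInv
    have htb := hInv.2 (n - 1) (n - 1) (by omega) (by omega) (by omega) (by omega)
    simp only [pvLoopBit]
    have hcond : ¬ ((R >>> pvBitIdx n (n - 1) (n - 1)) &&& 1 ≠ 0) := by
      rw [pvCondIff, htb]
      exact hun k
    rw [if_neg hcond]
    show (if ((pvShifts n a b).foldl (pvShiftOr R) R) &&& pvMask n = R then (-1 : Int)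
      else pvLoopBit (pvShifts n a b) (pvMask n) (pvBitIdx n (n - 1) (n - 1)) f
        ((k : Int) + 1) (((pvShifts n a b).foldl (pvShiftOr R) R) &&& pvMask n)) = _
    have hInv' := pvStepBit n a b hn ha han hb hbn k R hInv
    by_cases hfix : ((pvShifts n a b).foldl (pvShiftOr R) R) &&& pvMask n = R
    · rw [if_pos hfix]
    · rw [if_neg hfix]
      -- the table changed, so the frontier k+1 is nonempty
      have hne : ∃ c, pvFr n a b (k + 1) c := by
        by_contra hemp
        push_neg at hemp
        apply hfix
        apply Nat.eq_of_testBit_eq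
        intro i
        by_cases hNi : (((pvShifts n a b).foldl (pvShiftOr R) R) &&& pvMask n).testBit i = true
        · obtain ⟨x, y, hx, hy, rfl⟩ := hInv'.1 i hNi
          have hS1 := (hInv'.2 x y hx.1 hx.2 hy.1 hy.2).mp hNi
          have hSk : pvS n a b k (x, y) := by
            rcases (pvS_split n a b k (x, y)).mp hS1 with h | h
            · exact h
            · exact absurd h (hemp (x, y))
          rw [hNi, (hInv.2 x y hx.1 hx.2 hy.1 hy.2).mpr hSk]
        · by_cases hRi : R.testBit i = true
          · obtain ⟨x, y, hx, hy, rfl⟩ := hInv.1 i hRi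
            have hSk := (hInv.2 x y hx.1 hx.2 hy.1 hy.2).mp hRi
            have := (hInv'.2 x y hx.1 hx.2 hy.1 hy.2).mpr (Or.inl hSk)
            exact absurd this hNi
          · rw [Bool.not_eq_true] at hNi hRi
            rw [hNi, hRi]
      have hkK : k + 1 ≤ K := by
        by_contra hgt
        push_neg at hgt
        obtain ⟨c, hc⟩ := hne
        exact pvFr_empty_mono n a b hK (by omega) c hc
      have hcast : ((k : Int) + 1) = ((k + 1 : Nat) : Int) := by push_cast; ring
      rw [hcast]
      exact ihf (k + 1) _ (by omega) hInv'

theorem pvInvBit_init (n a b : Int) (hn : 1 ≤ n) : pvInvBit n a b 0 1 := by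
  constructor
  · intro i hi
    rw [pvTestBitOne, decide_eq_true_iff] at hi
    exact ⟨0, 0, ⟨le_refl 0, by omega⟩, ⟨le_refl 0, by omega⟩, by simp [hi, pvBitIdx]⟩
  · intro x y hx hxn hy hyn
    rw [pvTestBitOne, decide_eq_true_iff]
    show _ ↔ ((x, y) : Int × Int) = (0, 0)
    constructor
    · intro h0
      have hi : ((pvBitIdx n x y : Nat) : Int) = x * (2 * n) + y := pvBitIdx_toNat n x y (by omega) hx hy
      rw [h0] at hi
      have hsum : x * (2 * n) + y = 0 := by omega
      have hx2 : 0 ≤ x * (2 * n) := mul_nonneg hx (by omega)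
      have hx0 : x = 0 := by
        rcases mul_eq_zero.mp (by omega : x * (2 * n) = 0) with h | h
        · exact h
        · omega
      rw [Prod.ext_iff]
      exact ⟨hx0, by omega⟩
    · intro h0
      obtain ⟨h1, h2⟩ := Prod.ext_iff.mp h0
      simp only at h1 h2
      subst h1; subst h2
      simp [pvBitIdx]

theorem pvSolveBit_eq (n a b : Int) (ha : 1 ≤ a) (han : a < n) (hb : 1 ≤ b) (hbn : b < n) :
    pvSolveA n a b = pvSolveBit n a b := by
  have hn : 1 ≤ n := by omega
  have hshape : pvSolveBit n a b =
      pvLoopBit (pvShifts n a b) (pvMask n) (pvBitIdx n (n - 1) (n - 1))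
        (n.toNat * n.toNat + 2) ((0 : Nat) : Int) 1 := rfl
  rw [hshape]
  classical
  by_cases hreach : ∃ i, pvFr n a b i ((n - 1 : Int), (n - 1 : Int))
  · obtain ⟨j, hj⟩ := hreach
    have hjb : j < n.toNat * n.toNat := pvFr_card_bound n a b hn ⟨_, hj⟩
    rw [pvLoopBit_found n a b hn ha han hb hbn hj (n.toNat * n.toNat + 2) 0 1 (by omega)
      (by omega) (pvInvBit_init n a b hn)]
    exact pvSolveA_found n a b hn hj
  · push_neg at hreach
    have hun : ∀ j, ¬ pvS n a b j ((n - 1 : Int), (n - 1 : Int)) := by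
      intro j hS
      obtain ⟨i, hi⟩ := pvReach_fr n a b hS
      exact hreach i hi
    have hK : ∀ c, ¬ pvFr n a b (n.toNat * n.toNat) c := by
      intro c hc
      exact absurd (pvFr_card_bound n a b hn ⟨c, hc⟩) (lt_irrefl _)
    rw [pvLoopBit_unreach n a b hn ha han hb hbn hun hK (n.toNat * n.toNat + 2) 0 1 (by omega)
      (pvInvBit_init n a b hn)]
    exact pvSolveA_unreach n a b hn hreach

-- ===== VERDICT (by name: the statement is the Claim_ definition above) =====
theorem knightlOnAChessboard_spec : Claim_equal_knightlOnAChessboard := by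
  intro n _
  unfold Spec_knightlOnAChessboard knightlOnAChessboard knightlOnAChessboard_alt
  refine List.map_congr_left (fun a ha => ?_)
  rw [PySem.List.mem_pyRange_one] at ha
  refine List.map_congr_left (fun b hbm => ?_)
  rw [PySem.List.mem_pyRange_one] at hbm
  exact pvSolveBit_eq n a b ha.1 ha.2 hbm.1 hbm.2
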